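-- pv_equiv track=rewrite | github.com/ygidtu/pysashimi | src/SpliceRegion.py | set_sites
-- ===== SOURCE A (Python) =====
-- def set_sites(sites):
--     res = {}
--
--     if sites:
--         for s in sites:
--             if s not in res.keys():
--                 res[s] = "blue"
--             else:
--                 res[s] = "red"
--     return res
-- ===== SOURCE B (Python) =====
-- def set_sites(sites):
--     # Two-phase: tabulate frequencies first, then classify each distinct site.
--     if not sites:
--         return {}
--     counts = {}
--     for s in sites:
--         counts[s] = counts.get(s, 0) + 1
--     return {s: ("red" if c > 1 else "blue") for s, c in counts.items()}
-- ===== Notes on version B (the rewrite author's own statement) =====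
-- stated objective: idiomatic
-- what changed: Replaces A's single stateful overwrite loop (recolouring a key red when it is seen again) by a two-phase tabulate-then-classify computation: build a frequency table once, then produce the result dict in one pass over the counts.
import Mathlib
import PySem

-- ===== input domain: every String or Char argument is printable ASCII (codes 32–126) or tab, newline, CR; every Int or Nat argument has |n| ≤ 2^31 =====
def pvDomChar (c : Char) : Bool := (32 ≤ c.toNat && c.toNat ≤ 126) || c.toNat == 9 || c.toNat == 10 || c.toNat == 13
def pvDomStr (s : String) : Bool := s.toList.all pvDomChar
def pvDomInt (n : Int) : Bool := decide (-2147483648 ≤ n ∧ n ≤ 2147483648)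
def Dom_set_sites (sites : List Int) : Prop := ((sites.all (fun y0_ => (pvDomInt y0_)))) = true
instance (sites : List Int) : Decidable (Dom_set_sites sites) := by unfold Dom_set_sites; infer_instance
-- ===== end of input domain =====

-- B replaces A's single stateful overwrite loop by an idiomatic tabulate-then-classify
-- two-phase computation (frequency table first, then one classification pass).


-- ===== PORT A =====
-- res = {}; if sites: for s in sites: res[s] = "blue" if s not in res else "red"; return res
def set_sites (sites : List Int) : List (Int × String) :=
  let res : PySem.Dict Int String := PySem.Dict.empty
  let res :=
    if sites ≠ [] then
      sites.foldl
        (fun d s => if d.contains s = false then d.insert s "blue" else d.insert s "red")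
        res
    else res
  res.items

-- ===== PORT B =====
-- if not sites: return {}; counts[s] = counts.get(s,0)+1 for s in sites;
-- return {s: "red" if c > 1 else "blue" for s, c in counts.items()}
def set_sites_alt (sites : List Int) : List (Int × String) :=
  if sites = [] then []
  else
    let counts : PySem.Dict Int Int :=
      sites.foldl (fun d s => d.insert s (d.getD s 0 + 1)) PySem.Dict.empty
    (counts.items.foldl
        (fun d p => d.insert p.1 (if p.2 > 1 then "red" else "blue"))
        (PySem.Dict.empty : PySem.Dict Int String)).items

-- ===== PRECONDITION & SPEC =====
def Spec_set_sites (sites : List Int) (out : List (Int × String)) : Prop := out = set_sites_alt sites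
instance (sites : List Int) (out : List (Int × String)) : Decidable (Spec_set_sites sites out) := by unfold Spec_set_sites; infer_instance

-- ===== CLAIM (what is proved, stated in full; the proofs are below) =====
def Claim_equal_set_sites : Prop := ∀ (sites : List Int), Dom_set_sites sites → Spec_set_sites sites (set_sites sites)

-- ===== LEMMAS AND PROOFS =====

-- A's loop step is an insert whose value depends on membership.
theorem stepA_eq (d : PySem.Dict Int String) (s : Int) :
    (if d.contains s = false then d.insert s "blue" else d.insert s "red")
      = d.insert s (if d.contains s = false then "blue" else "red") := by
  by_cases h : d.contains s = false <;> simp [h]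

-- keys of A's loop are the distinct sites in first-occurrence order
theorem keysA (l : List Int) :
    (l.foldl (fun d s => if d.contains s = false then d.insert s "blue" else d.insert s "red")
      (PySem.Dict.empty : PySem.Dict Int String)).keys = PySem.Set.ofList l := by
  have h : (l.foldl (fun d s => if d.contains s = false then d.insert s "blue" else d.insert s "red")
      (PySem.Dict.empty : PySem.Dict Int String))
      = l.foldl (fun d s => d.insert s (if d.contains s = false then "blue" else "red"))
        (PySem.Dict.empty : PySem.Dict Int String) := by
    exact PySem.List.foldl_congr_mem _ _ _ _ (fun d s _ => stepA_eq d s)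
  rw [h, PySem.Dict.keys_foldl_insert, PySem.Set.ofList_eq_foldl]
  rfl

-- characterisation of A's loop result: items = distinct keys coloured by multiplicity
theorem itemsA (l : List Int) :
    (l.foldl (fun d s => if d.contains s = false then d.insert s "blue" else d.insert s "red")
      (PySem.Dict.empty : PySem.Dict Int String)).items
      = (PySem.Set.ofList l).map (fun k => (k, if 1 < l.count k then "red" else "blue")) := by
  induction l using List.reverseRecOn with
  | nil => rfl
  | append_singleton l x ih =>
    rw [List.foldl_append, List.foldl_cons, List.foldl_nil]
    have hofl : PySem.Set.ofList (l ++ [x]) = PySem.Set.add (PySem.Set.ofList l) x := by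
      rw [PySem.Set.ofList_eq_foldl, List.foldl_append, ← PySem.Set.ofList_eq_foldl]
      rfl
    by_cases hx : x ∈ l
    · have hc : (l.foldl (fun d s => if d.contains s = false then d.insert s "blue" else d.insert s "red")
          (PySem.Dict.empty : PySem.Dict Int String)).contains x = true := by
        rw [PySem.Dict.contains_iff_mem_keys, keysA, PySem.Set.mem_ofList]
        exact hx
      have hadd : PySem.Set.add (PySem.Set.ofList l) x = PySem.Set.ofList l := by
        simp [PySem.Set.add, PySem.Set.contains, hx]
      rw [if_neg (by simp [hc]), PySem.Dict.items_insert_of_contains _ _ hc, ih, hofl, hadd,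
        List.map_map]
      apply List.map_congr_left
      intro k hk
      rw [PySem.Set.mem_ofList] at hk
      by_cases hkx : k = x
      · subst hkx
        have hcount : 0 < l.count k := List.count_pos_iff.mpr hk
        have hcnt : (l ++ [k]).count k = l.count k + 1 := by
          simp [List.count_append]
        simp only [Function.comp_apply, beq_self_eq_true, if_pos, hcnt,
          if_pos (show 1 < l.count k + 1 by omega)]
      · have hcnt : (l ++ [x]).count k = l.count k := by
          simp [List.count_append, show ¬x = k from fun h => hkx h.symm]
        simp only [Function.comp_apply, hcnt,
          if_neg (show ¬ (k == x) = true by simpa using hkx)]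
    · have hc : (l.foldl (fun d s => if d.contains s = false then d.insert s "blue" else d.insert s "red")
          (PySem.Dict.empty : PySem.Dict Int String)).contains x = false := by
        rw [Bool.eq_false_iff]
        intro h
        rw [PySem.Dict.contains_iff_mem_keys, keysA, PySem.Set.mem_ofList] at h
        exact hx h
      have hadd : PySem.Set.add (PySem.Set.ofList l) x = PySem.Set.ofList l ++ [x] := by
        simp [PySem.Set.add, PySem.Set.contains, hx]
      rw [if_pos hc, PySem.Dict.items_insert_of_not_contains _ _ hc, ih, hofl, hadd,
        List.map_append]
      congr 1
      · apply List.map_congr_left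
        intro k hk
        rw [PySem.Set.mem_ofList] at hk
        have hkx : k ≠ x := fun h => hx (h ▸ hk)
        have hcnt : (l ++ [x]).count k = l.count k := by
          simp [List.count_append, show ¬x = k from fun h => hkx h.symm]
        rw [hcnt]
      · have h0 : l.count x = 0 := List.count_eq_zero_of_not_mem hx
        have hcnt : (l ++ [x]).count x = 1 := by
          simp [List.count_append, h0]
        simp only [List.map_cons, List.map_nil, hcnt]
        norm_num

-- characterisation of B's result on nonempty input
theorem itemsB (l : List Int) :
    ((l.foldl (fun d s => d.insert s (d.getD s 0 + 1)) (PySem.Dict.empty : PySem.Dict Int Int)).items.foldl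
        (fun d p => d.insert p.1 (if p.2 > 1 then "red" else "blue"))
        (PySem.Dict.empty : PySem.Dict Int String)).items
      = (PySem.Set.ofList l).map (fun k => (k, if 1 < l.count k then "red" else "blue")) := by
  rw [PySem.Dict.foldl_insert_getD_add_one_eq_counter]
  rw [PySem.Dict.items_foldl_insert_fresh _ Prod.fst
      (fun p => if p.2 > 1 then "red" else "blue") _
      (fun a _ => PySem.Dict.contains_empty a.1)
      (by
        have := PySem.Dict.nodup_keys_counter l
        simpa [PySem.Dict.keys] using this)]
  rw [PySem.Dict.items_counter, List.map_map]
  have hemp : (PySem.Dict.empty : PySem.Dict Int String).items = [] := rfl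
  rw [hemp, List.nil_append]
  apply List.map_congr_left
  intro k _
  simp only [Function.comp]
  congr 1
  by_cases h : 1 < l.count k
  · rw [if_pos h, if_pos (by exact_mod_cast h)]
  · rw [if_neg h, if_neg (by exact_mod_cast h)]

-- ===== VERDICT (by name: the statement is the Claim_ definition above) =====
theorem set_sites_spec : Claim_equal_set_sites := by
  intro sites _
  unfold Spec_set_sites set_sites set_sites_alt
  by_cases h : sites = []
  · subst h; rfl
  · show (if sites ≠ [] then _ else (PySem.Dict.empty : PySem.Dict Int String)).items = _
    rw [if_pos (show sites ≠ [] from h), if_neg h, itemsA, itemsB]
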